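-- pv_equiv track=rewrite | github.com/networkhermit/challenge | abc/LockerDoors/src/Lambda.py | process
-- ===== SOURCE A (Python) =====
-- import math
--
-- def process(n: int) -> list:
--     arr = [False] * n
--
--     temp = 0
--     for i in range(1, n + 1):
--         temp = int(math.sqrt(float(i)))
--         if temp * temp == i:
--             arr[i - 1] = True
--         else:
--             arr[i - 1] = False
--
--     return arr
-- ===== SOURCE B (Python) =====
-- def process(n: int) -> list:
--     arr = [False] * max(n, 0)
--     j = 1
--     while j * j <= n:
--         arr[j * j - 1] = True
--         j += 1
--     return arr
-- ===== Notes on version B (the rewrite author's own statement) =====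
-- stated objective: simpler
-- what changed: Instead of testing every index 1..n with a float sqrt, B writes True directly at the sqrt(n) perfect-square positions j*j-1 of an all-False list, so non-squares are never visited and no sqrt is computed.
import Mathlib
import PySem

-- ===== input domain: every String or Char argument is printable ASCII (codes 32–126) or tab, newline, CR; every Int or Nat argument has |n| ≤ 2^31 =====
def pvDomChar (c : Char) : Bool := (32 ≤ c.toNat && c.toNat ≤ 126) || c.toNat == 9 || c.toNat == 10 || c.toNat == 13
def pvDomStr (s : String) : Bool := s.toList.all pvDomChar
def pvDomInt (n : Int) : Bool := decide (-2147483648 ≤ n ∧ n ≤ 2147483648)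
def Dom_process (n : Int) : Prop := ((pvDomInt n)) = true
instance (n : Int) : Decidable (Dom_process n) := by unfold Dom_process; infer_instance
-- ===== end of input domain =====

-- B marks the sqrt(n) perfect-square positions of an all-False list directly instead of
-- testing every index with a float sqrt (objective: simpler).


-- ===== PORT A =====
-- int(math.sqrt(float(i))) is ported as Nat.sqrt i.toNat: exact on the domain |i| ≤ 2^31,
-- where the correctly rounded double sqrt truncates to the integer square root.
def pvBodyA (arr : List Bool) (i : Int) : List Bool :=
  let temp : Int := (Nat.sqrt i.toNat : Int)
  if temp * temp = i then arr.set (i - 1).toNat true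
  else arr.set (i - 1).toNat false

def process (n : Int) : List Bool :=
  (PySem.List.pyRange 1 (n + 1) 1).foldl pvBodyA (List.replicate n.toNat false)

-- ===== PORT B =====
-- the while loop of Source B, with fuel (n.toNat + 1 iterations always suffice since j*j grows)
def pvAltLoop : Nat → Int → Int → List Bool → List Bool
  | 0, _, _, arr => arr
  | f + 1, j, n, arr =>
      if j * j ≤ n then pvAltLoop f (j + 1) n (arr.set (j * j - 1).toNat true)
      else arr

def process_alt (n : Int) : List Bool :=
  pvAltLoop (n.toNat + 1) 1 n (List.replicate n.toNat false)

-- ===== PRECONDITION & SPEC =====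
def Spec_process (n : Int) (out : List Bool) : Prop := out = process_alt n
instance (n : Int) (out : List Bool) : Decidable (Spec_process n out) := by unfold Spec_process; infer_instance

-- ===== CLAIM (what is proved, stated in full; the proofs are below) =====
def Claim_equal_process : Prop := ∀ (n : Int), Dom_process n → Spec_process n (process n)

-- ===== LEMMAS AND PROOFS =====

-- the boolean A computes for index k (0-based): is k+1 a perfect square
def pvSq (t : Nat) : Bool := Nat.sqrt t * Nat.sqrt t == t

def pvSquares (m : Nat) : List Bool := (List.range m).map (fun k => pvSq (k + 1))

lemma pvAltLoop_length (f : Nat) (j n : Int) (arr : List Bool) :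
    (pvAltLoop f j n arr).length = arr.length := by
  induction f generalizing j arr with
  | zero => rfl
  | succ f ih =>
      simp only [pvAltLoop]
      split
      · rw [ih]; simp
      · rfl

lemma pvAltLoop_get (f : Nat) (j n : Int) (arr : List Bool) (k : Nat)
    (hj : 1 ≤ j) (hf : n < (j + f) * (j + f))
    (hlen : (k : Int) + 1 ≤ n → k < arr.length) :
    (pvAltLoop f j n arr)[k]? =
      if j ≤ (Nat.sqrt (k + 1) : Int) ∧
         (Nat.sqrt (k + 1) : Int) * (Nat.sqrt (k + 1) : Int) = (k : Int) + 1 ∧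
         (k : Int) + 1 ≤ n
      then some true else arr[k]? := by
  induction f generalizing j arr with
  | zero =>
      rw [if_neg]
      · rfl
      · rintro ⟨h1, h2, h3⟩
        have : j * j ≤ (Nat.sqrt (k + 1) : Int) * (Nat.sqrt (k + 1) : Int) :=
          mul_le_mul h1 h1 (by linarith) (by positivity)
        simp only [Nat.cast_zero, add_zero] at hf
        nlinarith
  | succ f ih =>
      simp only [pvAltLoop]
      by_cases h : j * j ≤ n
      · rw [if_pos h]
        have hf' : n < (j + 1 + (f : Int)) * (j + 1 + (f : Int)) := by
          push_cast at hf ⊢; linarith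
        rw [ih (j + 1) _ (by linarith) hf' (by simpa using hlen)]
        by_cases hk : (k : Int) = j * j - 1
        · -- k is the position set at this step
          have hk1 : (k : Int) + 1 = j * j := by omega
          have hjc : ((j.toNat : Int)) = j := Int.toNat_of_nonneg (by linarith)
          have hnat : k + 1 = j.toNat * j.toNat := by
            have : ((k + 1 : Nat) : Int) = ((j.toNat * j.toNat : Nat) : Int) := by
              push_cast [hjc]; linarith
            exact_mod_cast this
          have hsq : Nat.sqrt (k + 1) = j.toNat := by rw [hnat, Nat.sqrt_eq]
          rw [if_neg, if_pos]
          · -- set index is k, in range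
            have hkl : k < arr.length := hlen (by linarith)
            have hidx : (j * j - 1).toNat = k := by rw [← hk]; simp
            rw [hidx, List.getElem?_set_self hkl]
          · exact ⟨by rw [hsq, hjc], by rw [hsq, hjc]; linarith, by linarith⟩
          · rintro ⟨h1, _, _⟩
            rw [hsq, hjc] at h1; omega
        · -- untouched position
          have h0 : (0 : Int) ≤ j * j - 1 := by nlinarith
          have hidx : (j * j - 1).toNat ≠ k := by
            intro he
            apply hk
            rw [← he, Int.toNat_of_nonneg h0]
          rw [List.getElem?_set_ne hidx]
          have hiff : ((j + 1 ≤ (Nat.sqrt (k + 1) : Int)) ∧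
              (Nat.sqrt (k + 1) : Int) * (Nat.sqrt (k + 1) : Int) = (k : Int) + 1 ∧
              (k : Int) + 1 ≤ n) ↔
              ((j ≤ (Nat.sqrt (k + 1) : Int)) ∧
              (Nat.sqrt (k + 1) : Int) * (Nat.sqrt (k + 1) : Int) = (k : Int) + 1 ∧
              (k : Int) + 1 ≤ n) := by
            constructor
            · rintro ⟨h1, h2, h3⟩; exact ⟨by omega, h2, h3⟩
            · rintro ⟨h1, h2, h3⟩
              refine ⟨?_, h2, h3⟩
              rcases lt_or_eq_of_le h1 with hlt | heq
              · omega
              · exfalso; apply hk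
                have hjj : j * j = (k : Int) + 1 := by rw [heq]; exact h2
                linarith
          rw [if_congr hiff rfl rfl]
      · rw [if_neg h, if_neg]
        rintro ⟨h1, h2, h3⟩
        have : j * j ≤ (Nat.sqrt (k + 1) : Int) * (Nat.sqrt (k + 1) : Int) :=
          mul_le_mul h1 h1 (by linarith) (by positivity)
        nlinarith

-- the body of A's fold, with the two branches merged into one set (for positive i)
lemma process_body (arr : List Bool) (i : Int) (hi : 1 ≤ i) :
    pvBodyA arr i = arr.set (i - 1).toNat (pvSq i.toNat) := by
  have hi' : ((i.toNat : Int)) = i := Int.toNat_of_nonneg (by linarith)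
  unfold pvBodyA
  by_cases h : (Nat.sqrt i.toNat : Int) * (Nat.sqrt i.toNat : Int) = i
  · rw [if_pos h]
    have hb : pvSq i.toNat = true := by
      simp only [pvSq, beq_iff_eq]
      exact_mod_cast h.trans hi'.symm
    rw [hb]
  · rw [if_neg h]
    have hb : pvSq i.toNat = false := by
      simp only [pvSq, beq_eq_false_iff_ne, ne_eq]
      intro hc; apply h
      rw [← hi']; exact_mod_cast hc
    rw [hb]

lemma process_fold (m : Nat) (arr : List Bool) (hm : m ≤ arr.length) :
    ((List.range m).map (fun k : Nat => (1 : Int) + (k : Int))).foldl pvBodyA arr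
    = pvSquares m ++ arr.drop m := by
  induction m with
  | zero => simp [pvSquares]
  | succ m ih =>
      rw [List.range_succ, List.map_append, List.foldl_append,
        ih (by omega)]
      simp only [List.map_cons, List.map_nil, List.foldl_cons, List.foldl_nil]
      rw [process_body _ _ (by omega)]
      have hidx : ((1 : Int) + (m : Int) - 1).toNat = m := by omega
      have htn : ((1 : Int) + (m : Int)).toNat = m + 1 := by omega
      rw [hidx, htn]
      have hlen : (pvSquares m).length = m := by simp [pvSquares]
      rw [List.set_append, hlen]
      rw [if_neg (lt_irrefl m), Nat.sub_self]
      have hml : m < arr.length := by omega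
      rw [List.drop_eq_getElem_cons hml, List.set_cons_zero]
      have hsq1 : pvSquares (m + 1) = pvSquares m ++ [pvSq (m + 1)] := by
        simp [pvSquares, List.range_succ]
      rw [hsq1, List.append_assoc, List.singleton_append]

lemma process_eq_squares (n : Int) : process n = pvSquares n.toNat := by
  unfold process
  rw [PySem.List.pyRange_one]
  have : ((n + 1 : Int) - 1).toNat = n.toNat := by omega
  rw [this]
  rw [process_fold n.toNat _ (by simp)]
  simp

lemma process_alt_get (n : Int) (k : Nat) (hk : k < n.toNat) :
    (process_alt n)[k]? = some (pvSq (k + 1)) := by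
  unfold process_alt
  have hf : n < ((1 : Int) + (n.toNat + 1 : Nat)) * ((1 : Int) + (n.toNat + 1 : Nat)) := by
    have h0 : n ≤ (n.toNat : Int) := by omega
    push_cast
    nlinarith [Int.natCast_nonneg n.toNat]
  rw [pvAltLoop_get (n.toNat + 1) 1 n _ k le_rfl hf (fun _ => by simpa using hk)]
  have hkn : (k : Int) + 1 ≤ n := by omega
  have hget : (List.replicate n.toNat false)[k]? = some false := by
    simp [hk]
  by_cases hs : Nat.sqrt (k + 1) * Nat.sqrt (k + 1) = k + 1
  · rw [if_pos]
    · simp [pvSq, hs]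
    · have h1 : 1 ≤ Nat.sqrt (k + 1) := by
        have : 0 < Nat.sqrt (k + 1) := Nat.sqrt_pos.mpr (by omega)
        omega
      exact ⟨by exact_mod_cast h1, by exact_mod_cast hs, hkn⟩
  · rw [if_neg]
    · rw [hget]
      simp [pvSq, hs]
    · rintro ⟨_, h2, _⟩
      apply hs
      have : ((Nat.sqrt (k + 1) * Nat.sqrt (k + 1) : Nat) : Int) = ((k + 1 : Nat) : Int) := by
        push_cast; linarith
      exact_mod_cast this

lemma process_alt_length (n : Int) : (process_alt n).length = n.toNat := by
  unfold process_alt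
  rw [pvAltLoop_length]
  simp

-- ===== VERDICT (by name: the statement is the Claim_ definition above) =====
theorem process_spec : Claim_equal_process := by
  intro n _
  unfold Spec_process
  apply List.ext_getElem?
  intro k
  by_cases hk : k < n.toNat
  · rw [process_alt_get n k hk, process_eq_squares]
    simp [pvSquares, hk]
  · have h1 : (process n).length ≤ k := by
      rw [process_eq_squares]; simp [pvSquares]; omega
    have h2 : (process_alt n).length ≤ k := by rw [process_alt_length]; omega
    rw [List.getElem?_eq_none h1, List.getElem?_eq_none h2]
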